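-- pv_equiv track=rewrite | github.com/oleggromov/contests | one-zero-position.py | gen_str
-- ===== SOURCE A (Python) =====
-- def gen_str(length):
--   string = []
--   zeroes = 0
--   ones = 0
--   # O(n)
--   while length > 0:
--     if zeroes < ones + 1:
--       string.append('0')
--       zeroes += 1
--     else:
--       string.append('1')
--       ones += 1
--       zeroes = 0
--     length -= 1
--
--   return ' '.join(string)
-- ===== SOURCE B (Python) =====
-- def gen_str(length):
--     tokens = []
--     remaining = length
--     g = 1
--     while remaining > 0:
--         z = min(g, remaining)
--         tokens.extend(['0'] * z)
--         remaining -= z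
--         if remaining > 0:
--             tokens.append('1')
--             remaining -= 1
--         g += 1
--     return ' '.join(tokens)
-- ===== Notes on version B (the rewrite author's own statement) =====
-- stated objective: faster
-- what changed: B emits the string block-wise (for growing g: up to g zeros in one bulk list-extend, then one '1'), tracking only a remaining-token count, instead of A's token-at-a-time loop with zeroes/ones counters and per-token branching.
import Mathlib
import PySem

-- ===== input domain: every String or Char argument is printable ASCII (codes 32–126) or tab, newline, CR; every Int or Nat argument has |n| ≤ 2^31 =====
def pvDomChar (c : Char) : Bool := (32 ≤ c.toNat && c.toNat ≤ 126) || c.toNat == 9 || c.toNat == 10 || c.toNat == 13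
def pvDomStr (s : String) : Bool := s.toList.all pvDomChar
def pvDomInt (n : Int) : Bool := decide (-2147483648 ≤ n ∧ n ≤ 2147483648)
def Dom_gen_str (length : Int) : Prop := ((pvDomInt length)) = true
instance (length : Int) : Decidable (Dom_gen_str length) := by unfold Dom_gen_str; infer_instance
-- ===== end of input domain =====

-- B replaces A's token-at-a-time loop (zeroes/ones counters) by block-wise emission:
-- for g = 1,2,… append up to g zeros in bulk then one '1', tracking only the remaining count.

-- ===== PORT A =====
-- A's while loop: state (string, zeroes, ones, length); one token per iteration.
def genStrLoopA (length zeroes ones : Int) (string : List String) : List String :=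
  if _h : 0 < length then
    if zeroes < ones + 1 then
      genStrLoopA (length - 1) (zeroes + 1) ones (string ++ ["0"])
    else
      genStrLoopA (length - 1) 0 (ones + 1) (string ++ ["1"])
  else string
termination_by length.toNat
decreasing_by all_goals omega

def gen_str (length : Int) : String :=
  PySem.Str.join " " (genStrLoopA length 0 0 [])

-- ===== PORT B =====
-- B's while loop: state (tokens, remaining, g); per iteration a bulk extend of min(g,remaining)
-- zeros then, if room remains, one '1'.  (The `0 < g` conjunct only guards totality: every
-- call made by gen_str_alt has g ≥ 1, exactly as in Source B where g starts at 1 and grows.)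
def genStrLoopB (remaining g : Int) (tokens : List String) : List String :=
  if _h : 0 < remaining ∧ 0 < g then
    let z := min g remaining
    let tokens' := tokens ++ List.replicate z.toNat "0"
    let rem := remaining - z
    if _h2 : 0 < rem then genStrLoopB (rem - 1) (g + 1) (tokens' ++ ["1"])
    else tokens'   -- remaining = 0: the while loop exits
  else tokens
termination_by remaining.toNat
decreasing_by omega

def gen_str_alt (length : Int) : String :=
  PySem.Str.join " " (genStrLoopB length 1 [])

-- ===== PRECONDITION & SPEC =====
def Spec_gen_str (length : Int) (out : String) : Prop := out = gen_str_alt length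
instance (length : Int) (out : String) : Decidable (Spec_gen_str length out) := by unfold Spec_gen_str; infer_instance

-- ===== CLAIM (what is proved, stated in full; the proofs are below) =====
def Claim_equal_gen_str : Prop := ∀ (length : Int), Dom_gen_str length → Spec_gen_str length (gen_str length)

-- ===== LEMMAS AND PROOFS =====

-- A's zero-emitting phase: from state (z, k) with z + c = k + 1 (c zeros still to emit),
-- A appends min(c, n) zeros and, if tokens remain, one '1', resetting to state (0, k+1).
lemma genStrLoopA_zeros (c : ℕ) : ∀ (n z k : Int) (acc : List String), 0 ≤ n → z + (c : Int) = k + 1 →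
    genStrLoopA n z k acc =
      if n ≤ (c : Int) then acc ++ List.replicate n.toNat "0"
      else genStrLoopA (n - c - 1) 0 (k + 1) (acc ++ List.replicate c "0" ++ ["1"]) := by
  induction c with
  | zero =>
    intro n z k acc hn hzc
    simp only [Nat.cast_zero, List.replicate_zero, List.append_nil] at *
    rcases Int.lt_or_le 0 n with hpos | hle
    · rw [genStrLoopA]
      have hz : ¬ z < k + 1 := by omega
      simp only [dif_pos hpos, if_neg hz]
      have hnot : ¬ n ≤ 0 := by omega
      rw [if_neg hnot]
      congr 1
      omega
    · have hn0 : n = 0 := le_antisymm hle hn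
      subst hn0
      rw [genStrLoopA]
      simp
  | succ c ih =>
    intro n z k acc hn hzc
    rcases Int.lt_or_le 0 n with hpos | hle
    · rw [genStrLoopA]
      have hz : z < k + 1 := by push_cast at hzc; omega
      simp only [dif_pos hpos, if_pos hz]
      rw [ih (n - 1) (z + 1) k (acc ++ ["0"]) (by omega) (by push_cast at hzc ⊢; omega)]
      have hrep : acc ++ ["0"] ++ List.replicate (n - 1).toNat "0" = acc ++ List.replicate n.toNat "0" := by
        have : n.toNat = (n - 1).toNat + 1 := by omega
        rw [this, List.replicate_succ, List.append_assoc]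
        rfl
      have hrep2 : acc ++ ["0"] ++ List.replicate c "0" = acc ++ List.replicate (c + 1) "0" := by
        rw [List.replicate_succ, List.append_assoc]
        rfl
      by_cases hcase : n ≤ ((c + 1 : ℕ) : Int)
      · have : n - 1 ≤ (c : Int) := by push_cast at hcase ⊢; omega
        rw [if_pos this, if_pos hcase, hrep]
      · have : ¬ n - 1 ≤ (c : Int) := by push_cast at hcase ⊢; omega
        rw [if_neg this, if_neg hcase, hrep2]
        congr 1
        push_cast
        omega
    · have hn0 : n = 0 := le_antisymm hle hn
      subst hn0
      rw [genStrLoopA, dif_neg (by omega), if_pos (by positivity)]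
      simp

-- the two loops agree: A started in a fresh block (zeroes = 0, ones = k) matches B at gap g = k + 1
lemma loopA_eq_loopB (fuel : ℕ) : ∀ (n k : Int) (acc : List String), n.toNat ≤ fuel → 0 ≤ k →
    genStrLoopA n 0 k acc = genStrLoopB n (k + 1) acc := by
  induction fuel with
  | zero =>
    intro n k acc hfuel hk
    have hn : n ≤ 0 := by omega
    rw [genStrLoopA, genStrLoopB]
    have h1 : ¬ 0 < n := by omega
    rw [dif_neg h1, dif_neg (by omega)]
  | succ fuel ih =>
    intro n k acc hfuel hk
    rcases Int.lt_or_le 0 n with hpos | hle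
    case inr =>
      rw [genStrLoopA, genStrLoopB]
      rw [dif_neg (by omega), dif_neg (by omega)]
    case inl =>
      have hc : (0 : Int) + (((k + 1).toNat : ℕ) : Int) = k + 1 := by omega
      rw [genStrLoopA_zeros (k + 1).toNat n 0 k acc (le_of_lt hpos) hc]
      rw [genStrLoopB, dif_pos ⟨hpos, by omega⟩]
      by_cases hcase : n ≤ (((k + 1).toNat : ℕ) : Int)
      · rw [if_pos hcase]
        have hz : min (k + 1) n = n := by omega
        simp only [hz]
        have hrem : ¬ 0 < n - n := by omega
        rw [dif_neg hrem]
      · rw [if_neg hcase]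
        have hz : min (k + 1) n = k + 1 := by omega
        simp only [hz]
        have hrem : 0 < n - (k + 1) := by omega
        rw [dif_pos hrem]
        have h1 : n - ((k + 1).toNat : Int) - 1 = n - (k + 1) - 1 := by omega
        rw [h1]
        have := ih (n - (k + 1) - 1) (k + 1) (acc ++ List.replicate (k + 1).toNat "0" ++ ["1"])
          (by omega) (by omega)
        rw [this]

-- ===== VERDICT (by name: the statement is the Claim_ definition above) =====
theorem gen_str_spec : Claim_equal_gen_str := by
  intro length _
  unfold Spec_gen_str gen_str gen_str_alt
  rw [loopA_eq_loopB length.toNat length 0 [] le_rfl le_rfl]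
  norm_num
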